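-- pv_equiv track=rewrite | github.com/Bonnand/mastermind | main.py | number_partial_colors
-- ===== SOURCE A (Python) =====
-- def number_partial_colors(user_combination, true_combination):
--
--     number=0
--     true_combination_copy=true_combination.copy()
--     user_combination_copy=user_combination.copy()
--
--     for idx in range(len(user_combination)):
--         if(user_combination[idx]==true_combination[idx]):
--                 true_combination_copy[idx]="_"
--                 user_combination_copy[idx]="#"
--
--     for first_idx in range(len(true_combination_copy)):
--         for second_idx in range(len(user_combination_copy)):
--
--             if(true_combination_copy[first_idx]==user_combination_copy[second_idx]):
--                 true_combination_copy[first_idx]="-"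
--                 user_combination_copy[second_idx]="#"
--                 number+=1
--
--     return number
-- ===== SOURCE B (Python) =====
-- def number_partial_colors(user_combination, true_combination):
--     # Count the guessed colors that are not exact matches, then walk the secret
--     # and consume one count per color still available: two linear passes.
--     counts = {}
--     for idx, color in enumerate(user_combination):
--         if color != true_combination[idx]:
--             counts[color] = counts.get(color, 0) + 1
--     number = 0
--     for idx, color in enumerate(true_combination):
--         if idx < len(user_combination) and user_combination[idx] == color:
--             continue
--         if counts.get(color, 0) > 0:
--             counts[color] -= 1
--             number += 1
--     return number
-- ===== Notes on version B (the rewrite author's own statement) =====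
-- stated objective: faster
-- what changed: A's quadratic nested scan (for each secret slot, linearly search the guess for the first unmatched equal color) is replaced by two linear passes: count the non-exact-match guess colors in a dict, then walk the secret skipping exact matches and consuming one count per color; …
-- outside the precondition, e.g. on number_partial_colors(['z', '-'], ['a', 'z']): A returns 2, B returns 1; on number_partial_colors(['a', '_'], ['a', 'b']): A returns 1, B returns 0; on number_partial_colors(['a'], ['a', '#']): A returns 1, B returns 0
import Mathlib
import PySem

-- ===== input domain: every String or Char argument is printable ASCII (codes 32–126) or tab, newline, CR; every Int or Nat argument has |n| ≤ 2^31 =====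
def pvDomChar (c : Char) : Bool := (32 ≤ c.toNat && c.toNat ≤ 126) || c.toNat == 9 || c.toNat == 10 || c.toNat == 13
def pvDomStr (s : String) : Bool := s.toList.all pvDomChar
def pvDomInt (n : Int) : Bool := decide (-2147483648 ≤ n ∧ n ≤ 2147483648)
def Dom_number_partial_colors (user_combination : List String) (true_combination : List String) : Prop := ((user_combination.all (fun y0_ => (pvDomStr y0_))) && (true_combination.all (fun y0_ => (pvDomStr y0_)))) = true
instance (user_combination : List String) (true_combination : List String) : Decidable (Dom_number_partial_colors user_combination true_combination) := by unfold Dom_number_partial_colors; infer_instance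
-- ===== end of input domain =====

-- B replaces A's quadratic nested scan by two linear counting passes: O(n) vs O(n^2).

-- ===== PORT A =====
-- A-side helpers: the three loop bodies of A, named so the proofs can speak about them.
def pvMarkBody (u t : List String) :
    List String × List String → Int → List String × List String :=
  fun st idx =>
    if PySem.List.pyGetD u idx "" == PySem.List.pyGetD t idx "" then
      (PySem.List.pySetD st.1 idx "_", PySem.List.pySetD st.2 idx "#")
    else st

def pvInnerBody (first_idx : Int) :
    List String × List String × Int → Int → List String × List String × Int :=
  fun st2 second_idx =>
    if PySem.List.pyGetD st2.1 first_idx "" == PySem.List.pyGetD st2.2.1 second_idx "" then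
      (PySem.List.pySetD st2.1 first_idx "-", PySem.List.pySetD st2.2.1 second_idx "#",
        st2.2.2 + 1)
    else st2

def pvOuterBody :
    List String × List String × Int → Int → List String × List String × Int :=
  fun st first_idx =>
    (PySem.List.pyRange 0 (PySem.List.len st.2.1) 1).foldl (pvInnerBody first_idx) st

def number_partial_colors (user_combination : List String) (true_combination : List String) : Int :=
  let number : Int := 0
  let s1 :=
    (PySem.List.pyRange 0 (PySem.List.len user_combination) 1).foldl
      (pvMarkBody user_combination true_combination) (true_combination, user_combination)
  let s2 :=
    (PySem.List.pyRange 0 (PySem.List.len s1.1) 1).foldl pvOuterBody (s1.1, s1.2, number)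
  s2.2.2

-- ===== PORT B =====
-- B-side helpers: the two loop bodies of B.
def pvCntBody (t : List String) :
    PySem.Dict String Int → Int × String → PySem.Dict String Int :=
  fun counts p =>
    if p.2 ≠ PySem.List.pyGetD t p.1 "" then
      counts.insert p.2 (counts.getD p.2 0 + 1)
    else counts

def pvStepBody (u : List String) :
    PySem.Dict String Int × Int → Int × String → PySem.Dict String Int × Int :=
  fun st p =>
    if decide (p.1 < PySem.List.len u) && (PySem.List.pyGetD u p.1 "" == p.2) then st
    else if st.1.getD p.2 0 > 0 then
      (st.1.insert p.2 (st.1.getD p.2 0 - 1), st.2 + 1)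
    else st

def number_partial_colors_alt (user_combination : List String) (true_combination : List String) : Int :=
  let counts :=
    (PySem.List.enumerate user_combination 0).foldl (pvCntBody true_combination) PySem.Dict.empty
  let res :=
    (PySem.List.enumerate true_combination 0).foldl (pvStepBody user_combination) (counts, 0)
  res.2

-- ===== PRECONDITION & SPEC =====
-- Closed-form ingredients of Pre_ (read off the input, nothing is run):
-- s occurs in the guess at a position where the secret differs
def pvUnmatchedGuess (u t : List String) (s : String) : Bool :=
  (u.zip t).any (fun p => p.1 == s && !(p.1 == p.2))
-- s occurs in the secret at a position where the guess differs (or beyond the guess)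
def pvUnmatchedSecret (u t : List String) (s : String) : Bool :=
  (u.zip t).any (fun p => p.2 == s && !(p.1 == p.2)) || (t.drop u.length).contains s
-- some position is an exact match
def pvExactMatch (u t : List String) : Bool := (u.zip t).any (fun p => p.1 == p.2)
-- some color occurs unmatched in both the guess and the secret
def pvSharedColor (u t : List String) : Bool :=
  (u.zip t).any (fun p => !(p.1 == p.2) && pvUnmatchedSecret u t p.1)

-- Pre_ restricts to the game's natural color domain: it excludes guesses longer than the secret
-- (both A and B raise IndexError there), and the configurations where A's in-band marker strings
-- collide with genuine colors — an unmatched "-" guessed while some color occurs unmatched on both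
-- sides (A's "-" marker then cascades), an unmatched "_" guessed while an exact match exists (A's
-- "_" marker then matches it), or "#" unmatched in the secret while a match or shared color exists
-- (A's consumed-slot "#" markers then match it) — where A's value is accidental.
def Pre_number_partial_colors (user_combination : List String) (true_combination : List String) : Prop :=
  user_combination.length ≤ true_combination.length ∧
    ¬(pvUnmatchedGuess user_combination true_combination "-" ∧
        pvSharedColor user_combination true_combination) ∧
    ¬(pvUnmatchedGuess user_combination true_combination "_" ∧
        pvExactMatch user_combination true_combination) ∧
    ¬(pvUnmatchedSecret user_combination true_combination "#" ∧
        (pvExactMatch user_combination true_combination ∨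
          pvSharedColor user_combination true_combination))
instance (user_combination : List String) (true_combination : List String) : Decidable (Pre_number_partial_colors user_combination true_combination) := by unfold Pre_number_partial_colors; infer_instance

def pvWitness_number_partial_colors : List String × List String := (["red", "blue"], ["blue", "green"])

def Spec_number_partial_colors (user_combination : List String) (true_combination : List String) (out : Int) : Prop := out = number_partial_colors_alt user_combination true_combination
instance (user_combination : List String) (true_combination : List String) (out : Int) : Decidable (Spec_number_partial_colors user_combination true_combination out) := by unfold Spec_number_partial_colors; infer_instance

-- ===== CLAIM (what is proved, stated in full; the proofs are below) =====
def Claim_equal_number_partial_colors : Prop := ∀ (user_combination : List String) (true_combination : List String), Dom_number_partial_colors user_combination true_combination → Pre_number_partial_colors user_combination true_combination → Spec_number_partial_colors user_combination true_combination (number_partial_colors user_combination true_combination)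

-- ===== LEMMAS AND PROOFS =====

-- After A's first loop: unmatched user colors (matched slots become "#") …
def pvUcM (u t : List String) : List String :=
  List.zipWith (fun a b => if a == b then "#" else a) u t

-- … and the marked true list (matched slots become "_").
def pvTcM (u t : List String) : List String :=
  List.zipWith (fun b a => if a == b then "_" else b) t u ++ t.drop u.length

-- B's two lists: the guess colors and secret colors at non-exact-match positions.
def pvUcS (u t : List String) : List String :=
  (u.zip t).filterMap (fun p => if p.1 = p.2 then none else some p.1)

def pvTcS (u t : List String) : List String :=
  (u.zip t).filterMap (fun p => if p.1 = p.2 then none else some p.2) ++ t.drop u.length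

-- Greedy matching of A's second phase: for each true color, consume the first equal user slot.
def pvGo : List String → List String → Int → Int
  | [], _, n => n
  | v :: rest, uc, n =>
    match uc.findIdx? (· == v) with
    | none => pvGo rest uc n
    | some s => pvGo rest (uc.set s "#") (n + 1)

-- The same matching expressed on a count function.
def pvGoN : List String → (String → Int) → Int → Int
  | [], _, n => n
  | v :: rest, c, n =>
    if c v > 0 then pvGoN rest (fun w => if w = v then c v - 1 else c w) (n + 1)
    else pvGoN rest c n

-- B's phase-2 body as a function of the secret color alone.
def pvCBody : PySem.Dict String Int × Int → String → PySem.Dict String Int × Int :=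
  fun st v =>
    if st.1.getD v 0 > 0 then (st.1.insert v (st.1.getD v 0 - 1), st.2 + 1) else st

lemma pvFoldlFixed {α β : Type} (f : β → α → β) (X : β) :
    ∀ (l : List α), (∀ j ∈ l, f X j = X) → l.foldl f X = X := by
  intro l h
  induction l with
  | nil => rfl
  | cons j l ih =>
    simp only [List.foldl_cons, h j (by simp)]
    exact ih (fun x hx => h x (by simp [hx]))

lemma pvPhase1Aux (u t : List String) (h : u.length ≤ t.length) :
    ∀ (k : Nat), k ≤ u.length →
      (PySem.List.pyRange 0 (k : Int) 1).foldl (pvMarkBody u t) (t, u)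
        = (t.mapIdx (fun j x => if j < k ∧ u.getD j "" == t.getD j "" then "_" else x),
           u.mapIdx (fun j x => if j < k ∧ u.getD j "" == t.getD j "" then "#" else x)) := by
  intro k
  induction k with
  | zero =>
    intro _
    rw [PySem.List.pyRange_one_eq_nil (by omega), List.foldl_nil]
    refine Prod.mk.injEq .. ▸ ⟨?_, ?_⟩ <;>
      (apply List.ext_getElem (by simp) ; intro i h1 h2; simp)
  | succ k ih =>
    intro hk
    have hku : k < u.length := by omega
    have hkt : k < t.length := by omega
    have hcast : ((k + 1 : Nat) : Int) = (k : Int) + 1 := by push_cast; ring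
    rw [hcast, PySem.List.pyRange_one_succ_right (by omega), List.foldl_append,
      ih (by omega), List.foldl_cons, List.foldl_nil]
    unfold pvMarkBody
    rw [PySem.List.pyGetD_natCast, PySem.List.pyGetD_natCast]
    by_cases hc : u.getD k "" == t.getD k ""
    · rw [if_pos hc]
      simp only [PySem.List.pySetD_natCast]
      refine Prod.mk.injEq .. ▸ ⟨?_, ?_⟩
      · apply List.ext_getElem (by simp)
        intro i h1 h2
        simp only [List.getElem_set, List.getElem_mapIdx]
        rcases eq_or_ne k i with rfl | hne
        · have hc' : u[k] = t[k] := by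
            have hx := hc
            rw [List.getD_eq_getElem u "" hku, List.getD_eq_getElem t "" hkt] at hx
            simpa using hx
          simp [hku, hc', hkt]
        · rw [if_neg hne]
          have : (i < k ∧ (u.getD i "" == t.getD i "") = true)
              ↔ (i < k + 1 ∧ (u.getD i "" == t.getD i "") = true) := by
            constructor
            · rintro ⟨a, b⟩; exact ⟨by omega, b⟩
            · rintro ⟨a, b⟩; exact ⟨by omega, b⟩
          split_ifs with p q q <;> first | rfl | (exact absurd (this.mp p) q) | (exact absurd (this.mpr q) p)
      · apply List.ext_getElem (by simp)
        intro i h1 h2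
        simp only [List.getElem_set, List.getElem_mapIdx]
        rcases eq_or_ne k i with rfl | hne
        · have hc' : u[k] = t[k] := by
            have hx := hc
            rw [List.getD_eq_getElem u "" hku, List.getD_eq_getElem t "" hkt] at hx
            simpa using hx
          simp [hku, hc', hkt]
        · rw [if_neg hne]
          have : (i < k ∧ (u.getD i "" == t.getD i "") = true)
              ↔ (i < k + 1 ∧ (u.getD i "" == t.getD i "") = true) := by
            constructor
            · rintro ⟨a, b⟩; exact ⟨by omega, b⟩
            · rintro ⟨a, b⟩; exact ⟨by omega, b⟩
          split_ifs with p q q <;> first | rfl | (exact absurd (this.mp p) q) | (exact absurd (this.mpr q) p)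
    · rw [if_neg hc]
      refine Prod.mk.injEq .. ▸ ⟨?_, ?_⟩ <;>
      · apply List.ext_getElem (by simp)
        intro i h1 h2
        simp only [List.getElem_mapIdx]
        have : ∀ (i : Nat), (i < k ∧ (u.getD i "" == t.getD i "") = true)
            ↔ (i < k + 1 ∧ (u.getD i "" == t.getD i "") = true) := by
          intro i
          constructor
          · rintro ⟨a, b⟩; exact ⟨by omega, b⟩
          · rintro ⟨a, b⟩
            refine ⟨?_, b⟩
            rcases Nat.lt_succ_iff_lt_or_eq.mp a with h' | rfl
            · exact h'
            · exact absurd b (by simpa using hc)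
        split_ifs with p q q <;> first | rfl | (exact absurd ((this i).mp p) q) | (exact absurd ((this i).mpr q) p)

lemma pvPhase1 (u t : List String) (h : u.length ≤ t.length) :
    (PySem.List.pyRange 0 (u.length : Int) 1).foldl (pvMarkBody u t) (t, u)
      = (pvTcM u t, pvUcM u t) := by
  rw [pvPhase1Aux u t h u.length (le_refl _)]
  have hz : (List.zipWith (fun b a => if a == b then "_" else b) t u).length = u.length := by
    simp; omega
  refine Prod.mk.injEq .. ▸ ⟨?_, ?_⟩
  · apply List.ext_getElem (by simp [pvTcM, List.length_mapIdx, List.length_zipWith]; omega)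
    intro i h1 h2
    simp only [List.getElem_mapIdx, pvTcM, List.getElem_append, hz]
    have hit : i < t.length := by simpa using h1
    by_cases hiu : i < u.length
    · simp only [List.getElem_zipWith,
        List.getD_eq_getElem u "" (show i < u.length by omega),
        List.getD_eq_getElem t "" (show i < t.length by omega)]
      split_ifs with p q q <;> simp_all
    · simp only [List.getElem_drop]
      rw [if_neg (by rintro ⟨a, _⟩; omega), dif_neg hiu]
      congr 1
      omega
  · apply List.ext_getElem (by simp [pvUcM, List.length_mapIdx, List.length_zipWith]; omega)
    intro i h1 h2
    have hiu : i < u.length := by simpa using h1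
    simp only [List.getElem_mapIdx, pvUcM, List.getElem_zipWith,
      List.getD_eq_getElem u "" (show i < u.length by omega),
      List.getD_eq_getElem t "" (show i < t.length by omega)]
    split_ifs with p q q <;> simp_all

lemma pvInnerLemma (tc uc : List String) (n : Int) (f : Nat) (hf : f < tc.length)
    (hm : "-" ∉ uc) :
    (PySem.List.pyRange 0 (uc.length : Int) 1).foldl (pvInnerBody (f : Int)) (tc, uc, n) =
      match uc.findIdx? (· == tc[f]) with
      | none => (tc, uc, n)
      | some s => (tc.set f "-", uc.set s "#", n + 1) := by
  have htcf : PySem.List.pyGetD tc (f : Int) "" = tc[f] := by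
    rw [PySem.List.pyGetD_eq_getElem tc "" (by omega) (by exact_mod_cast hf)]
    simp
  rcases hfi : uc.findIdx? (· == tc[f]) with _ | s
  · rw [List.findIdx?_eq_none_iff] at hfi
    apply pvFoldlFixed
    intro j hj
    rw [PySem.List.mem_pyRange_one] at hj
    have hjlen : j < (uc.length : Int) := hj.2
    show pvInnerBody (f : Int) (tc, uc, n) j = (tc, uc, n)
    unfold pvInnerBody
    rw [htcf, PySem.List.pyGetD_eq_getElem uc "" hj.1 hjlen, if_neg]
    intro hc
    have hmem := hfi (uc[j.toNat]'(by omega)) (by simp)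
    simp only [beq_eq_false_iff_ne, ne_eq] at hmem
    simp only [beq_iff_eq] at hc
    exact hmem hc.symm
  · obtain ⟨hs, hps, hbefore⟩ := List.findIdx?_eq_some_iff_getElem.mp hfi
    have hucs : uc[s] = tc[f] := by simpa using hps
    rw [PySem.List.pyRange_one_append 0 (s : Int) (uc.length : Int) (by omega)
      (by exact_mod_cast Nat.le_of_lt hs), List.foldl_append]
    have hpre : (PySem.List.pyRange 0 (s : Int) 1).foldl (pvInnerBody (f : Int)) (tc, uc, n)
        = (tc, uc, n) := by
      apply pvFoldlFixed
      intro j hj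
      rw [PySem.List.mem_pyRange_one] at hj
      have hjlen : j < (uc.length : Int) := by
        have : j < (s : Int) := hj.2
        omega
      show pvInnerBody (f : Int) (tc, uc, n) j = (tc, uc, n)
      unfold pvInnerBody
      rw [htcf, PySem.List.pyGetD_eq_getElem uc "" hj.1 hjlen, if_neg]
      intro hc
      have hb := hbefore j.toNat (by omega)
      simp only [beq_iff_eq] at hc hb
      exact hb hc.symm
    rw [hpre, PySem.List.pyRange_one_cons (by exact_mod_cast hs), List.foldl_cons]
    have hstep : pvInnerBody (f : Int) (tc, uc, n) (s : Int)
        = (tc.set f "-", uc.set s "#", n + 1) := by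
      unfold pvInnerBody
      rw [htcf, PySem.List.pyGetD_eq_getElem uc "" (by omega) (by exact_mod_cast hs)]
      simp only [Int.toNat_natCast]
      rw [if_pos (by simp [hucs])]
      simp
    rw [hstep]
    apply pvFoldlFixed
    intro j hj
    rw [PySem.List.mem_pyRange_one] at hj
    have hjlen : j < ((uc.set s "#").length : Int) := by
      have := hj.2; simp only [List.length_set]; omega
    have hj0 : (0:Int) ≤ j := by have := hj.1; omega
    show pvInnerBody (f : Int) (tc.set f "-", uc.set s "#", n + 1) j
        = (tc.set f "-", uc.set s "#", n + 1)
    unfold pvInnerBody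
    have h1 : PySem.List.pyGetD (tc.set f "-") (f : Int) "" = "-" := by
      rw [PySem.List.pyGetD_eq_getElem (tc.set f "-") "" (by omega)
        (by simp; exact_mod_cast hf)]
      simp
    rw [h1, if_neg]
    intro hc
    have hmem : PySem.List.pyGetD (uc.set s "#") j "" ∈ uc.set s "#" := by
      apply PySem.List.pyGetD_mem
      unfold PySem.Raise.InRange
      simp only [List.length_set]
      constructor <;> omega
    simp only [beq_iff_eq] at hc
    rcases List.mem_or_eq_of_mem_set hmem with hmu | hE
    · exact hm (hc ▸ hmu)
    · rw [← hc] at hE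
      exact absurd hE (by decide)

lemma pvOuterLemma (tc0 : List String) :
    ∀ (k f : Nat) (tcx uc : List String) (n : Int),
      f + k = tc0.length → tcx.length = tc0.length →
      (∀ j : Nat, f ≤ j → tcx[j]? = tc0[j]?) → "-" ∉ uc →
      ((PySem.List.pyRange (f : Int) (tc0.length : Int) 1).foldl pvOuterBody (tcx, uc, n)).2.2
        = pvGo (tc0.drop f) uc n := by
  intro k
  induction k with
  | zero =>
    intro f tcx uc n hk _ _ _
    rw [PySem.List.pyRange_one_eq_nil (by omega), List.foldl_nil, List.drop_eq_nil_of_le (by omega)]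
    rfl
  | succ k ih =>
    intro f tcx uc n hk hlen hj hm
    have hflt : f < tc0.length := by omega
    have hflt' : f < tcx.length := by omega
    rw [PySem.List.pyRange_one_cons (by exact_mod_cast hflt), List.foldl_cons]
    have hv : tcx[f] = tc0[f] := by
      have := hj f (le_refl f)
      rw [List.getElem?_eq_getElem hflt', List.getElem?_eq_getElem hflt] at this
      exact Option.some_injective _ this
    have hdrop : tc0.drop f = tc0[f] :: tc0.drop (f + 1) :=
      (List.getElem_cons_drop hflt).symm
    have hob : pvOuterBody (tcx, uc, n) (f : Int)
        = (PySem.List.pyRange 0 (uc.length : Int) 1).foldl (pvInnerBody (f : Int)) (tcx, uc, n) := by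
      unfold pvOuterBody
      simp [PySem.List.len_eq]
    rw [hob, pvInnerLemma tcx uc n f hflt' hm]
    rcases hfi : uc.findIdx? (· == tcx[f]) with _ | s
    · rw [hdrop]
      have : pvGo (tc0[f] :: tc0.drop (f + 1)) uc n = pvGo (tc0.drop (f + 1)) uc n := by
        simp only [pvGo]
        rw [← hv, hfi]
      rw [this]
      have hcast : ((f : Int) + 1) = ((f + 1 : Nat) : Int) := by push_cast; ring
      rw [hcast]
      exact ih (f + 1) tcx uc n (by omega) hlen (fun j hj' => hj j (by omega)) hm
    · obtain ⟨hs, _, _⟩ := List.findIdx?_eq_some_iff_getElem.mp hfi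
      rw [hdrop]
      have : pvGo (tc0[f] :: tc0.drop (f + 1)) uc n = pvGo (tc0.drop (f + 1)) (uc.set s "#") (n + 1) := by
        simp only [pvGo]
        rw [← hv, hfi]
      rw [this]
      have hcast : ((f : Int) + 1) = ((f + 1 : Nat) : Int) := by push_cast; ring
      rw [hcast]
      apply ih (f + 1) (tcx.set f "-") (uc.set s "#") (n + 1) (by omega) (by simpa using hlen)
      · intro j hj'
        rw [List.getElem?_set_ne (by omega)]
        exact hj j (by omega)
      · intro hcontra
        rcases List.mem_or_eq_of_mem_set hcontra with hmu | hE
        · exact hm hmu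
        · exact absurd hE (by decide)

lemma pvA_phase (u t : List String) (h : u.length ≤ t.length) :
    number_partial_colors u t
      = ((PySem.List.pyRange 0 ((pvTcM u t).length : Int) 1).foldl pvOuterBody
          (pvTcM u t, pvUcM u t, 0)).2.2 := by
  unfold number_partial_colors
  simp only [PySem.List.len_eq]
  rw [pvPhase1 u t h]

lemma pvA_eq (u t : List String) (h : u.length ≤ t.length) (hm2 : "-" ∉ pvUcM u t) :
    number_partial_colors u t = pvGo (pvTcM u t) (pvUcM u t) 0 := by
  rw [pvA_phase u t h]
  have := pvOuterLemma (pvTcM u t) (pvTcM u t).length 0 (pvTcM u t) (pvUcM u t) 0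
    (by omega) rfl (fun j _ => rfl) hm2
  simpa using this

-- When every comparison fails, A's second phase never changes its state.
lemma pvPhase2Fixed (tc uc : List String) (n : Int) (hd : ∀ v ∈ tc, v ∉ uc) :
    ((PySem.List.pyRange 0 ((tc.length : Int)) 1).foldl pvOuterBody (tc, uc, n))
      = (tc, uc, n) := by
  apply pvFoldlFixed
  intro f hf
  rw [PySem.List.mem_pyRange_one] at hf
  show pvOuterBody (tc, uc, n) f = (tc, uc, n)
  unfold pvOuterBody
  simp only [PySem.List.len_eq]
  apply pvFoldlFixed
  intro j hj
  rw [PySem.List.mem_pyRange_one] at hj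
  show pvInnerBody f (tc, uc, n) j = (tc, uc, n)
  unfold pvInnerBody
  rw [if_neg]
  intro hc
  simp only [beq_iff_eq] at hc
  have h1 : PySem.List.pyGetD tc f "" ∈ tc := by
    apply PySem.List.pyGetD_mem
    unfold PySem.Raise.InRange
    constructor <;> omega
  have h2 : PySem.List.pyGetD uc j "" ∈ uc := by
    apply PySem.List.pyGetD_mem
    unfold PySem.Raise.InRange
    constructor <;> omega
  exact hd _ h1 (hc ▸ h2)

-- A count function that is nowhere positive matches nothing.
lemma pvGoN_zero : ∀ (tc : List String) (c : String → Int) (n : Int),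
    (∀ v ∈ tc, c v ≤ 0) → pvGoN tc c n = n := by
  intro tc
  induction tc with
  | nil => intro c n _; rfl
  | cons v rest ih =>
    intro c n h
    simp only [pvGoN, if_neg (by have := h v (by simp); omega : ¬ c v > 0)]
    exact ih c n (fun w hw => h w (by simp [hw]))

-- Membership in the marked lists, sharpened to the skipped lists.
lemma pvUcM_mem (u : List String) :
    ∀ (t : List String) (x : String), x ∈ pvUcM u t → x = "#" ∨ x ∈ pvUcS u t := by
  induction u with
  | nil => intro t x hx; simp [pvUcM] at hx
  | cons a u ih =>
    intro t x hx
    cases t with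
    | nil => simp [pvUcM] at hx
    | cons b t =>
      simp only [pvUcM, pvUcS, List.zipWith_cons_cons, List.zip_cons_cons,
        List.filterMap_cons, List.mem_cons] at hx ⊢
      rcases hx with hx | hx
      · by_cases hab : a = b
        · rw [if_pos (by simp [hab] : (a == b) = true)] at hx
          exact Or.inl hx
        · rw [if_neg (by simp [hab] : ¬ (a == b) = true)] at hx
          rw [if_neg hab]
          right; simp [hx]
      · rcases ih t x hx with h1 | h1
        · exact Or.inl h1
        · right
          by_cases hab : a = b
          · rw [if_pos hab]; exact h1
          · rw [if_neg hab]; simp only [List.mem_cons]; exact Or.inr h1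

lemma pvTcM_mem (u : List String) :
    ∀ (t : List String) (x : String), x ∈ pvTcM u t → x = "_" ∨ x ∈ pvTcS u t := by
  induction u with
  | nil =>
    intro t x hx
    simp only [pvTcM, List.zipWith_nil_right, List.nil_append, List.length_nil,
      List.drop_zero] at hx
    right
    simp [pvTcS, hx]
  | cons a u ih =>
    intro t x hx
    cases t with
    | nil => simp [pvTcM] at hx
    | cons b t =>
      simp only [pvTcM, pvTcS, List.zipWith_cons_cons, List.zip_cons_cons,
        List.filterMap_cons, List.length_cons, List.drop_succ_cons,
        List.cons_append, List.mem_cons] at hx ⊢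
      rcases hx with hx | hx
      · by_cases hab : a = b
        · rw [if_pos (by simp [hab] : (a == b) = true)] at hx
          exact Or.inl hx
        · rw [if_neg (by simp [hab] : ¬ (a == b) = true)] at hx
          rw [if_neg hab]
          right; simp [hx]
      · rcases ih t x hx with h1 | h1
        · exact Or.inl h1
        · right
          by_cases hab : a = b
          · rw [if_pos hab]; exact h1
          · rw [if_neg hab]
            simp only [List.cons_append, List.mem_cons]
            exact Or.inr h1

-- Without any exact match the marked lists are the skipped lists.
lemma pvNoMatchU (u : List String) :
    ∀ (t : List String), (∀ p ∈ u.zip t, p.1 ≠ p.2) → pvUcM u t = pvUcS u t := by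
  induction u with
  | nil => intro t _; simp [pvUcM, pvUcS]
  | cons a u ih =>
    intro t hp
    cases t with
    | nil => simp [pvUcM, pvUcS]
    | cons b t =>
      have hab : ¬ a = b := hp (a, b) (by simp)
      simp only [pvUcM, pvUcS, List.zipWith_cons_cons, List.zip_cons_cons,
        List.filterMap_cons, if_neg hab, if_neg (by simp [hab] : ¬ (a == b) = true)]
      have := ih t (fun p hpz => hp p (by simp [hpz]))
      simp only [pvUcM, pvUcS] at this
      rw [this]

lemma pvNoMatchT (u : List String) :
    ∀ (t : List String), (∀ p ∈ u.zip t, p.1 ≠ p.2) → pvTcM u t = pvTcS u t := by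
  induction u with
  | nil => intro t _; simp [pvTcM, pvTcS]
  | cons a u ih =>
    intro t hp
    cases t with
    | nil => simp [pvTcM, pvTcS]
    | cons b t =>
      have hab : ¬ a = b := hp (a, b) (by simp)
      simp only [pvTcM, pvTcS, List.zipWith_cons_cons, List.zip_cons_cons,
        List.filterMap_cons, if_neg hab, if_neg (by simp [hab] : ¬ (a == b) = true),
        List.length_cons, List.drop_succ_cons, List.cons_append]
      have := ih t (fun p hpz => hp p (by simp [hpz]))
      simp only [pvTcM, pvTcS] at this
      rw [this]

-- Bridges between Pre_'s Boolean ingredients and the proof's lists.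
lemma pvUG_iff (u t : List String) (s : String) :
    pvUnmatchedGuess u t s = true ↔ s ∈ pvUcS u t := by
  simp only [pvUnmatchedGuess, List.any_eq_true, pvUcS, List.mem_filterMap,
    Bool.and_eq_true, beq_iff_eq, Bool.not_eq_eq_eq_not, Bool.not_true,
    beq_eq_false_iff_ne, ne_eq]
  constructor
  · rintro ⟨p, hp, rfl, hne⟩
    exact ⟨p, hp, by simp [hne]⟩
  · rintro ⟨p, hp, hf⟩
    by_cases h : p.1 = p.2
    · simp [h] at hf
    · simp only [if_neg h, Option.some.injEq] at hf
      subst hf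
      exact ⟨p, hp, rfl, h⟩

lemma pvUS_iff (u t : List String) (s : String) :
    pvUnmatchedSecret u t s = true ↔ s ∈ pvTcS u t := by
  simp only [pvUnmatchedSecret, Bool.or_eq_true, List.any_eq_true, pvTcS,
    List.mem_append, List.mem_filterMap, Bool.and_eq_true, beq_iff_eq,
    Bool.not_eq_eq_eq_not, Bool.not_true, beq_eq_false_iff_ne, ne_eq,
    List.contains_iff_mem]
  constructor
  · rintro (⟨p, hp, rfl, hne⟩ | hd)
    · exact Or.inl ⟨p, hp, by simp [hne]⟩
    · exact Or.inr hd
  · rintro (⟨p, hp, hf⟩ | hd)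
    · by_cases h : p.1 = p.2
      · simp [h] at hf
      · simp only [if_neg h, Option.some.injEq] at hf
        subst hf
        exact Or.inl ⟨p, hp, rfl, h⟩
    · exact Or.inr hd

lemma pvEM_false_iff (u t : List String) :
    pvExactMatch u t = false ↔ ∀ p ∈ u.zip t, p.1 ≠ p.2 := by
  simp [pvExactMatch, List.any_eq_false]

lemma pvSC_false (u t : List String) (h : pvSharedColor u t = false) :
    ∀ c ∈ pvUcS u t, c ∉ pvTcS u t := by
  intro c hc ht
  rw [← pvUG_iff] at hc
  rw [← pvUS_iff] at ht
  simp only [pvUnmatchedGuess, List.any_eq_true, Bool.and_eq_true, beq_iff_eq,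
    Bool.not_eq_eq_eq_not, Bool.not_true, beq_eq_false_iff_ne, ne_eq] at hc
  obtain ⟨p, hp, rfl, hne⟩ := hc
  have h2 : pvSharedColor u t = true := by
    simp only [pvSharedColor, List.any_eq_true]
    exact ⟨p, hp, by rw [Bool.and_eq_true]; exact ⟨by simp [hne], ht⟩⟩
  rw [h] at h2
  exact absurd h2 (by decide)

-- pvGoN depends only on the counts at the colors of the secret list.
lemma pvGoN_congr :
    ∀ (tc : List String) (c c' : String → Int) (n : Int),
      (∀ v ∈ tc, c v = c' v) → pvGoN tc c n = pvGoN tc c' n := by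
  intro tc
  induction tc with
  | nil => intro c c' n _; rfl
  | cons v rest ih =>
    intro c c' n h
    have hv := h v (by simp)
    simp only [pvGoN, hv]
    by_cases hp : c' v > 0
    · rw [if_pos hp, if_pos hp]
      apply ih
      intro w hw
      by_cases hwv : w = v <;> simp [hwv, h w (by simp [hw])]
    · rw [if_neg hp, if_neg hp]
      exact ih c c' n (fun w hw => h w (by simp [hw]))

-- Colors whose count never goes positive (here "_") can be dropped from the secret list.
lemma pvGoN_skip :
    ∀ (tc : List String) (c : String → Int) (n : Int), c "_" ≤ 0 →
      pvGoN tc c n = pvGoN (tc.filter (fun v => !(v == "_"))) c n := by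
  intro tc
  induction tc with
  | nil => intro c n _; rfl
  | cons v rest ih =>
    intro c n hc
    by_cases hv : v = "_"
    · subst hv
      simp only [pvGoN, List.filter_cons, if_neg (show ¬ c "_" > 0 by omega)]
      simpa using ih c n hc
    · have hfil : (List.filter (fun v => !(v == "_")) (v :: rest))
          = v :: rest.filter (fun v => !(v == "_")) := by
        simp [hv]
      rw [hfil]
      simp only [pvGoN]
      by_cases hp : c v > 0
      · rw [if_pos hp, if_pos hp]
        exact ih _ _ (by simp [Ne.symm hv]; omega)
      · rw [if_neg hp, if_neg hp]
        exact ih c n hc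

-- A's greedy scan equals the count-based recursion when "#" is not a secret color.
lemma pvGo_eq_pvGoN :
    ∀ (tc uc : List String) (n : Int), "#" ∉ tc →
      pvGo tc uc n = pvGoN tc (fun v => (uc.count v : Int)) n := by
  intro tc
  induction tc with
  | nil => intro uc n _; rfl
  | cons v rest ih =>
    intro uc n hh
    have hvh : v ≠ "#" := fun h => hh (by simp [h])
    have hrest : "#" ∉ rest := fun h => hh (by simp [h])
    rcases hfi : uc.findIdx? (· == v) with _ | s
    · have hall := List.findIdx?_eq_none_iff.mp hfi
      have hcnt : uc.count v = 0 := by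
        rw [List.count_eq_zero]
        intro hv
        have := hall v hv
        simp at this
      simp only [pvGo, hfi, pvGoN, hcnt]
      rw [if_neg (by omega)]
      exact ih uc n hrest
    · obtain ⟨hs, hps, _⟩ := List.findIdx?_eq_some_iff_getElem.mp hfi
      have hucs : uc[s] = v := by simpa using hps
      have hmem : v ∈ uc := hucs ▸ List.getElem_mem hs
      have hcnt : 0 < uc.count v := List.count_pos_iff.mpr hmem
      simp only [pvGo, hfi, pvGoN]
      rw [if_pos (by exact_mod_cast hcnt)]
      rw [ih (uc.set s "#") (n + 1) hrest]
      apply pvGoN_congr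
      intro w hw
      have hwh : w ≠ "#" := fun h => hrest (h ▸ hw)
      have hset := List.count_set (l := uc) (i := s) (a := "#") (b := w) hs
      simp only [hucs, beq_iff_eq] at hset
      rw [hset]
      by_cases hwv : w = v
      · subst hwv
        simp only [if_neg (Ne.symm hwh)]
        push_cast [Nat.sub_add_cancel (by omega : 1 ≤ uc.count w)]
        omega
      · rw [if_neg (show ¬ v = w from fun h => hwv h.symm),
          if_neg (show ¬ "#" = w from fun h => hwh h.symm), if_neg hwv]
        push_cast
        omega

-- The marked lists and the skipped lists have the same counts / the same non-"_" colors.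
lemma pvCount_eq_pvUcS (u : List String) :
    ∀ (t : List String) (w : String), w ≠ "#" →
      (pvUcM u t).count w = (pvUcS u t).count w := by
  induction u with
  | nil => intro t w _; simp [pvUcM, pvUcS]
  | cons a u ih =>
    intro t w hw
    cases t with
    | nil => simp [pvUcM, pvUcS]
    | cons b t =>
      have hrec := ih t w hw
      simp only [pvUcM, pvUcS] at hrec
      by_cases hab : a = b
      · simp only [pvUcM, pvUcS, List.zipWith_cons_cons, List.zip_cons_cons,
          List.filterMap_cons, if_pos (show (a == b) = true by simp [hab]), if_pos hab,
          List.count_cons]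
        rw [hrec]
        simp [Ne.symm hw]
      · simp only [pvUcM, pvUcS, List.zipWith_cons_cons, List.zip_cons_cons,
          List.filterMap_cons, if_neg (show ¬ (a == b) = true by simp [hab]), if_neg hab,
          List.count_cons]
        rw [hrec]

lemma pvFilter_eq (u : List String) :
    ∀ (t : List String),
      (pvTcM u t).filter (fun v => !(v == "_"))
        = (pvTcS u t).filter (fun v => !(v == "_")) := by
  induction u with
  | nil => intro t; simp [pvTcM, pvTcS]
  | cons a u ih =>
    intro t
    cases t with
    | nil => simp [pvTcM, pvTcS]
    | cons b t =>
      have hrec := ih t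
      simp only [pvTcM, pvTcS] at hrec
      by_cases hab : a = b
      · simp only [pvTcM, pvTcS, List.zipWith_cons_cons, List.zip_cons_cons,
          List.filterMap_cons, if_pos (show (a == b) = true by simp [hab]), if_pos hab,
          List.length_cons, List.drop_succ_cons, List.cons_append, List.filter_cons]
        simpa using hrec
      · simp only [pvTcM, pvTcS, List.zipWith_cons_cons, List.zip_cons_cons,
          List.filterMap_cons, if_neg (show ¬ (a == b) = true by simp [hab]), if_neg hab,
          List.length_cons, List.drop_succ_cons, List.cons_append, List.filter_cons]
        rw [hrec]

-- B's phase-2 fold over a dict computes pvGoN.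
lemma pvDictGo :
    ∀ (tc : List String) (d : PySem.Dict String Int) (c : String → Int) (n : Int),
      (∀ v ∈ tc, d.getD v 0 = c v) →
      (tc.foldl pvCBody (d, n)).2 = pvGoN tc c n := by
  intro tc
  induction tc with
  | nil => intro d c n _; rfl
  | cons v rest ih =>
    intro d c n h
    have hv := h v (by simp)
    simp only [List.foldl_cons, pvCBody, pvGoN, hv]
    by_cases hp : c v > 0
    · rw [if_pos hp, if_pos hp]
      apply ih
      intro w hw
      rw [PySem.Dict.getD_insert]
      by_cases hwv : w = v <;> simp [hwv, h w (by simp [hw])]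
    · rw [if_neg hp, if_neg hp]
      exact ih d c n (fun w hw => h w (by simp [hw]))

-- foldl with a skip branch = foldl over the filterMap'd list.
lemma pvFoldlFilterMap {α β γ : Type} (f : α → Option β) (g : γ → β → γ) :
    ∀ (l : List α) (init : γ),
      l.foldl (fun x y => (f y).elim x (g x)) init = (l.filterMap f).foldl g init := by
  intro l
  induction l with
  | nil => intro init; rfl
  | cons a l ih =>
    intro init
    cases hfa : f a <;> simp [hfa, ih]

-- B's first pass builds exactly the counter of pvUcS …
lemma pvPhaseB1 (u t : List String) (h : u.length ≤ t.length) :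
    (PySem.List.enumerate u 0).foldl (pvCntBody t) PySem.Dict.empty
      = PySem.Dict.counter (pvUcS u t) := by
  have hmap : (PySem.List.enumerate u 0).map (fun p => (p.2, PySem.List.pyGetD t p.1 "")) = u.zip t := by
    apply List.ext_getElem
    · simp [PySem.List.length_enumerate]; omega
    · intro k h1 h2
      have hk : k < u.length := by simpa [PySem.List.length_enumerate] using h1
      have hkt : k < t.length := by omega
      simp [PySem.List.getElem_enumerate, PySem.List.pyGetD_natCast,
        List.getD_eq_getElem?_getD, List.getElem?_eq_getElem hkt]
  have hbody : pvCntBody t = fun (d : PySem.Dict String Int) (p : Int × String) =>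
      (if p.2 = PySem.List.pyGetD t p.1 "" then none else some p.2).elim d
        (fun x => d.insert x (d.getD x 0 + 1)) := by
    funext d p
    unfold pvCntBody
    by_cases hc : p.2 = PySem.List.pyGetD t p.1 ""
    · rw [if_neg (not_not_intro hc), if_pos hc]; rfl
    · rw [if_pos hc, if_neg hc]; rfl
  have hfm : (PySem.List.enumerate u 0).filterMap
        (fun p => if p.2 = PySem.List.pyGetD t p.1 "" then none else some p.2)
      = pvUcS u t := by
    rw [pvUcS, ← hmap, List.filterMap_map]
    apply List.filterMap_congr
    intro p _
    simp [Function.comp]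
  rw [hbody, pvFoldlFilterMap, hfm,
    PySem.Dict.foldl_insert_getD_add_one_eq_counter]

-- … and B's second pass is the pvCBody fold over pvTcS.
lemma pvPhaseB2 (u t : List String) (h : u.length ≤ t.length)
    (d : PySem.Dict String Int) :
    (PySem.List.enumerate t 0).foldl (pvStepBody u) (d, 0)
      = (pvTcS u t).foldl pvCBody (d, 0) := by
  have hbody : pvStepBody u = fun (st : PySem.Dict String Int × Int) (p : Int × String) =>
      (if decide (p.1 < PySem.List.len u) && (PySem.List.pyGetD u p.1 "" == p.2)
       then none else some p.2).elim st (fun v => pvCBody st v) := by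
    funext st p
    unfold pvStepBody
    by_cases hc : (decide (p.1 < PySem.List.len u) && (PySem.List.pyGetD u p.1 "" == p.2)) = true
    · rw [if_pos hc, if_pos hc]; rfl
    · rw [if_neg hc, if_neg hc]; rfl
  have htake : t = t.take u.length ++ t.drop u.length := (List.take_append_drop _ t).symm
  have hlen1 : (t.take u.length).length = u.length := by simp; omega
  have hfm : (PySem.List.enumerate t 0).filterMap
        (fun p => if decide (p.1 < PySem.List.len u) && (PySem.List.pyGetD u p.1 "" == p.2)
                  then none else some p.2)
      = pvTcS u t := by
    unfold pvTcS
    conv_lhs => rw [htake]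
    rw [PySem.List.enumerate_append, List.filterMap_append]
    congr 1
    · -- the first u.length entries: compare with the guess positionally
      have hmap : (PySem.List.enumerate (t.take u.length) 0).map
            (fun p => (PySem.List.pyGetD u p.1 "", p.2)) = u.zip t := by
        apply List.ext_getElem
        · simp only [List.length_map, PySem.List.length_enumerate, List.length_zip,
            List.length_take]
          try omega
        · intro k h1 h2
          have hk : k < u.length := by
            simpa [PySem.List.length_enumerate, hlen1] using h1
          have hkt : k < t.length := by omega
          simp [PySem.List.getElem_enumerate, PySem.List.pyGetD_natCast,
            List.getD_eq_getElem?_getD, List.getElem?_eq_getElem hk, List.getElem_take]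
      rw [List.filterMap_congr (g := fun p =>
          ((fun q : String × String => if q.1 = q.2 then none else some q.2) ∘
            (fun p : Int × String => (PySem.List.pyGetD u p.1 "", p.2))) p) ?_,
        ← List.filterMap_map, hmap]
      intro p hp
      rw [PySem.List.mem_enumerate_iff] at hp
      obtain ⟨k, hk, rfl⟩ := hp
      have hk' : k < u.length := by simpa [hlen1] using hk
      simp only [Function.comp, PySem.List.len_eq]
      simp [hk']
    · -- the tail beyond the guess: everything is kept
      rw [List.filterMap_congr (g := fun p : Int × String => some p.2) ?_]
      · rw [hlen1]
        have : (fun p : Int × String => some p.2) = some ∘ Prod.snd := rfl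
        rw [this, List.filterMap_eq_map, PySem.List.map_snd_enumerate]
      · intro p hp
        rw [PySem.List.mem_enumerate_iff] at hp
        obtain ⟨k, hk, rfl⟩ := hp
        simp only [PySem.List.len_eq, List.length_take]
        split_ifs with hcond
        · exfalso
          rw [Bool.and_eq_true, decide_eq_true_eq] at hcond
          have := hcond.1
          push_cast at this
          omega
        · rfl
  rw [hbody, pvFoldlFilterMap, hfm]

lemma pvB_eq (u t : List String) (h : u.length ≤ t.length) :
    number_partial_colors_alt u t
      = pvGoN (pvTcS u t) (fun v => ((pvUcS u t).count v : Int)) 0 := by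
  have hdef : number_partial_colors_alt u t
      = ((PySem.List.enumerate t 0).foldl (pvStepBody u)
          ((PySem.List.enumerate u 0).foldl (pvCntBody t) PySem.Dict.empty, 0)).2 := rfl
  rw [hdef, pvPhaseB1 u t h, pvPhaseB2 u t h]
  exact pvDictGo (pvTcS u t) _ _ 0 (fun v _ => by simp [PySem.Dict.getD_counter])

-- ===== VERDICT (by name: the statement is the Claim_ definition above) =====
theorem number_partial_colors_spec : Claim_equal_number_partial_colors := by
  intro u t _hdom hpre
  obtain ⟨hlen, hC1, hC2, hC3⟩ := hpre
  unfold Spec_number_partial_colors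
  by_cases hmk : "-" ∉ pvUcS u t ∧ "_" ∉ pvUcS u t ∧ "#" ∉ pvTcS u t
  · -- main case: no marker string in a hazard position
    obtain ⟨h1, h2, h3⟩ := hmk
    have hdash : "-" ∉ pvUcM u t := by
      intro hx
      rcases pvUcM_mem u t _ hx with hE | hs
      · exact absurd hE (by decide)
      · exact h1 hs
    have hhashM : "#" ∉ pvTcM u t := by
      intro hx
      rcases pvTcM_mem u t _ hx with hE | hs
      · exact absurd hE (by decide)
      · exact h3 hs
    have hundM : ((pvUcM u t).count "_" : Int) ≤ 0 := by
      have : "_" ∉ pvUcM u t := by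
        intro hx
        rcases pvUcM_mem u t _ hx with hE | hs
        · exact absurd hE (by decide)
        · exact h2 hs
      simp [List.count_eq_zero.mpr this]
    have hundS : ((pvUcS u t).count "_" : Int) ≤ 0 := by
      simp [List.count_eq_zero.mpr h2]
    rw [pvA_eq u t hlen hdash, pvGo_eq_pvGoN _ _ 0 hhashM, pvGoN_skip _ _ 0 hundM,
      pvGoN_congr _ _ (fun v => ((pvUcS u t).count v : Int)) 0 ?hc, pvFilter_eq u t,
      ← pvGoN_skip _ _ 0 hundS, pvB_eq u t hlen]
    case hc =>
      intro v hv
      rw [List.mem_filter] at hv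
      obtain ⟨hvm, hvne⟩ := hv
      have hvh : v ≠ "#" := fun h => hhashM (h ▸ hvm)
      have hcc := pvCount_eq_pvUcS u t v hvh
      show (((pvUcM u t).count v : Nat) : Int) = (((pvUcS u t).count v : Nat) : Int)
      exact_mod_cast hcc
  · -- a marker occurs in a hazard position; Pre_ forces a degenerate configuration
    by_cases hem : pvExactMatch u t = true
    · -- an exact match exists, so "_"/"#" hazards are excluded and the colors are disjoint
      have h2 : "_" ∉ pvUcS u t := fun hs => hC2 ⟨(pvUG_iff u t "_").mpr hs, hem⟩
      have h3 : "#" ∉ pvTcS u t := fun hs => hC3 ⟨(pvUS_iff u t "#").mpr hs, Or.inl hem⟩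
      have h1 : "-" ∈ pvUcS u t := by
        by_contra h1
        exact hmk ⟨h1, h2, h3⟩
      have hsc : pvSharedColor u t = false := by
        by_contra hsc
        exact hC1 ⟨(pvUG_iff u t "-").mpr h1, by simpa using hsc⟩
      have hdisj := pvSC_false u t hsc
      have hAd : ∀ v ∈ pvTcM u t, v ∉ pvUcM u t := by
        intro v hv hw
        rcases pvTcM_mem u t v hv with rfl | hvs
        · rcases pvUcM_mem u t _ hw with hE | hs
          · exact absurd hE (by decide)
          · exact h2 hs
        · rcases pvUcM_mem u t v hw with rfl | hs
          · exact h3 hvs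
          · exact hdisj v hs hvs
      have hA0 : number_partial_colors u t = 0 := by
        rw [pvA_phase u t hlen, pvPhase2Fixed _ _ _ hAd]
      have hB0 : number_partial_colors_alt u t = 0 := by
        rw [pvB_eq u t hlen]
        apply pvGoN_zero
        intro v hv
        simp [List.count_eq_zero.mpr (fun hvu => hdisj v hvu hv)]
      rw [hA0, hB0]
    · -- no exact match anywhere: the marked lists are the skipped lists
      have hnm := (pvEM_false_iff u t).mp (by simpa using hem)
      have hU := pvNoMatchU u t hnm
      have hT := pvNoMatchT u t hnm
      by_cases hsc : pvSharedColor u t = true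
      · -- a shared color exists, so "-"/"#" hazards are excluded: direct chain
        have h1 : "-" ∉ pvUcS u t := fun hs => hC1 ⟨(pvUG_iff u t "-").mpr hs, hsc⟩
        have h3 : "#" ∉ pvTcS u t := fun hs => hC3 ⟨(pvUS_iff u t "#").mpr hs, Or.inr hsc⟩
        have hdash : "-" ∉ pvUcM u t := by rw [hU]; exact h1
        have hhashM : "#" ∉ pvTcM u t := by rw [hT]; exact h3
        rw [pvA_eq u t hlen hdash, pvGo_eq_pvGoN _ _ 0 hhashM, hT, hU, pvB_eq u t hlen]
      · -- unmatched colors disjoint: neither side finds anything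
        have hdisj := pvSC_false u t (by simpa using hsc)
        have hAd : ∀ v ∈ pvTcM u t, v ∉ pvUcM u t := by
          rw [hU, hT]
          intro v hv hw
          exact hdisj v hw hv
        have hA0 : number_partial_colors u t = 0 := by
          rw [pvA_phase u t hlen, pvPhase2Fixed _ _ _ hAd]
        have hB0 : number_partial_colors_alt u t = 0 := by
          rw [pvB_eq u t hlen]
          apply pvGoN_zero
          intro v hv
          simp [List.count_eq_zero.mpr (fun hvu => hdisj v hvu hv)]
        rw [hA0, hB0]
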